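-- pv_equiv track=rewrite | github.com/autocorr/adventofcode | adventofcode/day09.py | cancel
-- ===== SOURCE A (Python) =====
-- def cancel(stream):
--     cancelling = False
--     for c in stream:
--         if cancelling:
--             cancelling = False
--             continue
--         elif c == '!':
--             cancelling = True
--             continue
--         else:
--             yield c
-- ===== SOURCE B (Python) =====
-- def cancel(stream):
--     # Segment-jump scan: use str.find to locate each '!' marker, emit the whole
--     # clean segment before it in a burst, and jump past the marker and its victim.
--     i = 0
--     n = len(stream)
--     while i < n:
--         j = stream.find('!', i)
--         if j == -1:
--             yield from stream[i:]
--             return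
--         yield from stream[i:j]
--         i = j + 2
-- ===== Notes on version B (the rewrite author's own statement) =====
-- stated objective: alternative
-- what changed: Replaced the per-character boolean state machine with a segment-jump scan: str.find locates each '!' marker, the clean segment before it is emitted in one burst via a slice, and the index jumps past the marker and the cancelled character.
import Mathlib
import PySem

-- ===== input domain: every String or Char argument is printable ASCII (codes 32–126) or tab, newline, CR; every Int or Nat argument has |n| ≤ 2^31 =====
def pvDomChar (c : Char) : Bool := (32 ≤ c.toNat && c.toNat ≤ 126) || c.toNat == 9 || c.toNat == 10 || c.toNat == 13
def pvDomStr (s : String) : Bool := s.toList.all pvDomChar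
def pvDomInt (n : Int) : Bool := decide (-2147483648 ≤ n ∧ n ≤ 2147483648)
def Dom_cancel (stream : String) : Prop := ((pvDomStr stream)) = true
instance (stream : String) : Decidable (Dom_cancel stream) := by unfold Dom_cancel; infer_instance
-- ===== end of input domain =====

-- B replaces A's per-character boolean state machine by a segment-jump scan (find the next '!',
-- emit the clean segment before it as a burst, jump past marker and victim); alternative, same cost.


-- ===== PORT A =====
-- generator collected as a list; the 'cancelling' flag is threaded as state, branches in A's order
def cancelLoop : List Char → Bool → List String
  | [], _ => []
  | _ :: rest, true => cancelLoop rest false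
  | c :: rest, false =>
      if c == '!' then cancelLoop rest true
      else String.ofList [c] :: cancelLoop rest false

def cancel (stream : String) : List String := cancelLoop stream.toList false

-- ===== PORT B =====
-- segment-jump scan over the remaining suffix: stream.find('!', i) is findIdx? on the suffix at i,
-- stream[i:j] is the take before the marker, i = j + 2 is the drop past marker and victim
def cancelAltGo (cs : List Char) : List String :=
  match h : cs.findIdx? (· == '!') with
  | none => cs.map (fun c => String.ofList [c])          -- j == -1: yield from stream[i:]
  | some j =>
      (cs.take j).map (fun c => String.ofList [c])        -- yield from stream[i:j]
        ++ cancelAltGo (cs.drop (j + 2))                  -- i = j + 2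
termination_by cs.length
decreasing_by
  have hj := (List.findIdx?_eq_some_iff_findIdx_eq.mp h).1
  simp [List.length_drop]; omega

def cancel_alt (stream : String) : List String := cancelAltGo stream.toList

-- ===== PRECONDITION & SPEC =====
def Spec_cancel (stream : String) (out : List String) : Prop := out = cancel_alt stream
instance (stream : String) (out : List String) : Decidable (Spec_cancel stream out) := by unfold Spec_cancel; infer_instance

-- ===== CLAIM =====
def Claim_equal_cancel : Prop := ∀ (stream : String), Dom_cancel stream → Spec_cancel stream (cancel stream)

-- ===== LEMMAS AND PROOFS =====
theorem cancelLoop_no_bang (cs : List Char) (h : ∀ c ∈ cs, (c == '!') = false) :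
    cancelLoop cs false = cs.map (fun c => String.ofList [c]) := by
  induction cs with
  | nil => rfl
  | cons c rest ih =>
      have hc := h c (by simp)
      simp [cancelLoop, hc, ih fun x hx => h x (by simp [hx])]

theorem cancelLoop_append (pre cs : List Char) (h : ∀ c ∈ pre, (c == '!') = false) :
    cancelLoop (pre ++ cs) false
      = pre.map (fun c => String.ofList [c]) ++ cancelLoop cs false := by
  induction pre with
  | nil => rfl
  | cons c rest ih =>
      have hc := h c (by simp)
      simp [cancelLoop, hc, ih fun x hx => h x (by simp [hx])]

theorem cancelLoop_true (xs : List Char) : cancelLoop xs true = cancelLoop (xs.drop 1) false := by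
  cases xs <;> rfl

theorem cancelLoop_eq_alt (n : Nat) : ∀ cs : List Char, cs.length ≤ n →
    cancelLoop cs false = cancelAltGo cs := by
  induction n with
  | zero =>
      intro cs hcs
      have : cs = [] := List.length_eq_zero_iff.mp (Nat.le_zero.mp hcs)
      subst this; rw [cancelAltGo]; rfl
  | succ n ih =>
      intro cs hcs
      rw [cancelAltGo]
      cases h : cs.findIdx? (· == '!') with
      | none =>
          exact cancelLoop_no_bang cs (by simpa using List.findIdx?_eq_none_iff.mp h)
      | some j =>
          obtain ⟨hj, hget, hprev⟩ := List.findIdx?_eq_some_iff_getElem.mp h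
          have hbang : cs[j] = '!' := by simpa using hget
          have htake : ∀ c ∈ cs.take j, (c == '!') = false := by
            intro c hc
            obtain ⟨k, hk, hkc⟩ := List.mem_take_iff_getElem.mp hc
            have hk' : k < j := by omega
            have := hprev k hk'
            simp only [← hkc]
            simpa using this
          have hsplit : cs = cs.take j ++ (cs[j] :: cs.drop (j + 1)) := by
            conv_lhs => rw [← List.take_append_drop j cs]
            rw [List.getElem_cons_drop]
          calc cancelLoop cs false
              = cancelLoop (cs.take j ++ (cs[j] :: cs.drop (j + 1))) false := by rw [← hsplit]
            _ = (cs.take j).map (fun c => String.ofList [c])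
                  ++ cancelLoop (cs[j] :: cs.drop (j + 1)) false := cancelLoop_append _ _ htake
            _ = (cs.take j).map (fun c => String.ofList [c])
                  ++ cancelLoop (cs.drop (j + 2)) false := by
                  rw [hbang]
                  simp [cancelLoop, cancelLoop_true, List.drop_drop]
            _ = (cs.take j).map (fun c => String.ofList [c]) ++ cancelAltGo (cs.drop (j + 2)) := by
                  rw [ih (cs.drop (j + 2)) (by simp [List.length_drop]; omega)]

-- ===== VERDICT =====
theorem cancel_spec : Claim_equal_cancel := by
  intro stream _
  unfold Spec_cancel cancel cancel_alt
  exact cancelLoop_eq_alt stream.toList.length stream.toList le_rfl
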